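-- pv_equiv track=rewrite | github.com/vyeevani/llm_code_autocomplete | prediction_engine/einsum.py | parse_einsum_equation
-- ===== SOURCE A (Python) =====
-- def parse_einsum_equation(equation):
--     """
--     Args
--         equation : str
--      parse the equation in the following manner:
--      (running example: "nchw,nwhr->nchr")
--     step 1: split the equation with delimiter "->"
--         e.g.: this will give "nchw,nwhr" and "nchr"
--     step 2: split the LHS equation string with delimiter ","
--         e.g.: this will give input1 : "nchw", input2: "nwhr"
--     step 3: map each character to a unique integer, which is incremented.
--             Iterate over input1, input2 and output, in that order.
--             e.g.: input 1, i.e., "nchw" will give vector {0,1,2,3}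
--                   input 2, i.e, "nwhr" will produce {0,3,2,4}
--                   output , i.e. "nchr" will produce {0,1,2,4}
--     return vectors corresponding to the 2 inputs and the output
--     """
--     equation = equation.replace(" ", '')
--     input_output_str = equation.split('->')
--     assert len(input_output_str) == 2, "unsupported einsum equation {}".format(equation)
--     input_str = input_output_str[0]
--     output_str = input_output_str[1]
--
--     inputs = input_str.split(',')
--     assert len(inputs) == 2, "unsupported einsum equation {}".format(equation)
--     input1_str = inputs[0]
--     input2_str = inputs[1]
--
--     input1_vec = [-1 for i in range(len(input1_str))]
--     input2_vec = [-1 for i in range(len(input2_str))]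
--     output_vec = [-1 for i in range(len(output_str))]
--     map_char_to_int = {}
--
--     def _update_vec(str, vec, map_char_to_int, index):
--         for i, s in enumerate(str):
--             if s not in map_char_to_int:
--                 map_char_to_int[s] = index
--                 index += 1
--             vec[i] = map_char_to_int[s]
--         return index
--
--     index = _update_vec(input1_str, input1_vec, map_char_to_int, 0)
--     index = _update_vec(input2_str, input2_vec, map_char_to_int, index)
--     index = _update_vec(output_str, output_vec, map_char_to_int, index)
--
--     return input1_vec, input2_vec, output_vec
-- ===== SOURCE B (Python) =====
-- def parse_einsum_equation(equation):
--     equation = equation.replace(" ", '')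
--     parts = equation.split('->')
--     assert len(parts) == 2, "unsupported einsum equation {}".format(equation)
--     inputs = parts[0].split(',')
--     assert len(inputs) == 2, "unsupported einsum equation {}".format(equation)
--     input1_str, input2_str = inputs
--     output_str = parts[1]
--
--     t = input1_str + input2_str + output_str
--
--     # closed form: the integer assigned to a character c is the number of
--     # DISTINCT characters strictly before c's first occurrence in the
--     # concatenation input1+input2+output -- no table, no running counter.
--     def code(c):
--         return len(set(t[:t.index(c)]))
--
--     return ([code(c) for c in input1_str],
--             [code(c) for c in input2_str],
--             [code(c) for c in output_str])
-- ===== Notes on version B (the rewrite author's own statement) =====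
-- stated objective: alternative
-- what changed: Drops A's char-to-int dictionary and the index accumulator threaded through three build-and-fill passes entirely: B computes each character's code by a per-character closed form, len(set(t[:t.index(c)])) over the concatenation t, i.e. the number of distinct characters before c's first occurrence.
import Mathlib
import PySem

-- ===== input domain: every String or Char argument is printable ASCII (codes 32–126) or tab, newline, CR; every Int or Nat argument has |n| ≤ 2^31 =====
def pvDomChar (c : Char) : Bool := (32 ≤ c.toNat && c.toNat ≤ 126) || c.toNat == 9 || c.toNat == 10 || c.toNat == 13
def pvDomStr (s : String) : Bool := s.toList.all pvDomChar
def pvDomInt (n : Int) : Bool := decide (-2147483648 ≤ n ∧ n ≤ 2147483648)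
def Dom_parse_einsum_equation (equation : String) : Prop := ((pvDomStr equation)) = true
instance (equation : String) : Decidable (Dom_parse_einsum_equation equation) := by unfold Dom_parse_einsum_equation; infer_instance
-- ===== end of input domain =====

-- B drops A's char→int dictionary and its threaded index counter altogether and computes each
-- character's code by a per-character closed form over the concatenation t = input1+input2+output:
-- len(set(t[:t.index(c)])), the number of distinct characters before c's first occurrence.
-- Objective: alternative (O(n) dict passes → O(n²) closed form), same behaviour incl. assertions.

-- ===== PORT A =====
-- body of A's inner 'for i, s in enumerate(str)' loop of _update_vec
def pvStepA (st : List Int × PySem.Dict Char Int × Int) (p : Int × Char) :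
    List Int × PySem.Dict Char Int × Int :=
  let vec := st.1
  let d := st.2.1
  let index := st.2.2
  let di := if d.contains p.2 then (d, index) else (d.insert p.2 index, index + 1)
  (PySem.List.pySetD vec p.1 (di.1.getD p.2 0), di.1, di.2)

-- A's helper _update_vec (returns the mutated vec and dict alongside the returned index)
def pvUpdateVec (s : List Char) (vec : List Int) (d : PySem.Dict Char Int) (index : Int) :
    List Int × PySem.Dict Char Int × Int :=
  (PySem.List.enumerate s).foldl pvStepA (vec, d, index)

def parse_einsum_equation (equation : String) : List Int × List Int × List Int :=
  let equation := (PySem.Str.replace equation " " "").toList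
  let input_output_str := PySem.Chars.splitOn equation ['-', '>']
  let input_str := input_output_str.getD 0 []
  let output_str := input_output_str.getD 1 []
  let inputs := PySem.Chars.splitOn input_str [',']
  let input1_str := inputs.getD 0 []
  let input2_str := inputs.getD 1 []
  let input1_vec := (PySem.List.pyRange 0 (PySem.List.len input1_str) 1).map (fun _ => (-1 : Int))
  let input2_vec := (PySem.List.pyRange 0 (PySem.List.len input2_str) 1).map (fun _ => (-1 : Int))
  let output_vec := (PySem.List.pyRange 0 (PySem.List.len output_str) 1).map (fun _ => (-1 : Int))
  let r1 := pvUpdateVec input1_str input1_vec PySem.Dict.empty 0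
  let r2 := pvUpdateVec input2_str input2_vec r1.2.1 r1.2.2
  let r3 := pvUpdateVec output_str output_vec r2.2.1 r2.2.2
  (r1.1, r2.1, r3.1)

-- ===== PORT B =====
-- Source B's 'code(c) = len(set(t[:t.index(c)]))'; every c handed to code is a character of t, so
-- Python's t.index never raises — the '.getD 0' arm of index? is unreachable on those calls.
def pvCode (t : List Char) (c : Char) : Int :=
  ((PySem.Set.ofList
      (PySem.List.slice t none (some (((PySem.List.index? t c).getD 0 : Nat) : Int)))).length : Int)

def parse_einsum_equation_alt (equation : String) : List Int × List Int × List Int :=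
  let equation := (PySem.Str.replace equation " " "").toList
  let parts := PySem.Chars.splitOn equation ['-', '>']
  let inputs := PySem.Chars.splitOn (parts.getD 0 []) [',']
  let input1_str := inputs.getD 0 []
  let input2_str := inputs.getD 1 []
  let output_str := parts.getD 1 []
  let t := input1_str ++ input2_str ++ output_str
  (input1_str.map (pvCode t), input2_str.map (pvCode t), output_str.map (pvCode t))

-- ===== PRECONDITION & SPEC =====
-- Pre_ excludes exactly the inputs on which A's two asserts fail (AssertionError):
-- the space-stripped equation must split on '->' into exactly 2 parts and the LHS on ',' into exactly 2.
def Pre_parse_einsum_equation (equation : String) : Prop :=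
  let parts := PySem.Chars.splitOn ((PySem.Str.replace equation " " "").toList) ['-', '>']
  parts.length = 2 ∧ (PySem.Chars.splitOn (parts.getD 0 []) [',']).length = 2
instance (equation : String) : Decidable (Pre_parse_einsum_equation equation) := by
  unfold Pre_parse_einsum_equation; infer_instance

def pvWitness_parse_einsum_equation : String := "nchw,nwhr->nchr"

def Spec_parse_einsum_equation (equation : String) (out : List Int × List Int × List Int) : Prop :=
  out = parse_einsum_equation_alt equation
instance (equation : String) (out : List Int × List Int × List Int) :
    Decidable (Spec_parse_einsum_equation equation out) := by
  unfold Spec_parse_einsum_equation; infer_instance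

-- ===== CLAIM (what is proved, stated in full; the proofs are below) =====
def Claim_equal_parse_einsum_equation : Prop :=
  ∀ (equation : String), Dom_parse_einsum_equation equation →
    Pre_parse_einsum_equation equation →
      Spec_parse_einsum_equation equation (parse_einsum_equation equation)

-- ===== LEMMAS AND PROOFS =====

-- sequential writes at positions j, j+1, … (what A's vec[i] = … amounts to)
def pvWrite (vec : List Int) (j : Nat) : List Int → List Int
  | [] => vec
  | y :: ys => pvWrite (vec.set j y) (j + 1) ys

theorem pvWrite_cons_succ (a : Int) (vec : List Int) (j : Nat) (ys : List Int) :
    pvWrite (a :: vec) (j + 1) ys = a :: pvWrite vec j ys := by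
  induction ys generalizing vec j a with
  | nil => rfl
  | cons y ys ih =>
    simp only [pvWrite, List.set_cons_succ]
    exact ih _ _ _

theorem pvWrite_full (ys vec : List Int) (h : ys.length = vec.length) :
    pvWrite vec 0 ys = ys := by
  induction ys generalizing vec with
  | nil => cases vec with | nil => rfl | cons v t => simp at h
  | cons y ys ih =>
    cases vec with
    | nil => simp at h
    | cons v t =>
      simp only [pvWrite, List.set_cons_zero, pvWrite_cons_succ]
      simp only [List.length_cons, Nat.succ_inj] at h
      rw [ih t h]

-- proof-side model of A's dict: the first-occurrence table over a list of chars
def pvBuildMap (cs : List Char) (d : PySem.Dict Char Int) : PySem.Dict Char Int :=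
  cs.foldl (fun d c => d.setdefault c (d.size : Int)) d

theorem pvBuildMap_cons (c : Char) (s : List Char) (d : PySem.Dict Char Int) :
    pvBuildMap (c :: s) d = pvBuildMap s (d.setdefault c (d.size : Int)) := rfl

-- lookups of already-present keys survive pvBuildMap
theorem pvBuildMap_getD (s : List Char) (d : PySem.Dict Char Int) (c : Char)
    (h : d.contains c = true) : (pvBuildMap s d).getD c 0 = d.getD c 0 := by
  induction s generalizing d with
  | nil => rfl
  | cons c' s ih =>
    rw [pvBuildMap_cons]
    by_cases hc : d.contains c' = true
    · rw [PySem.Dict.setdefault_of_contains _ _ hc]; exact ih d h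
    · have hne : c ≠ c' := fun he => hc (he ▸ h)
      rw [PySem.Dict.setdefault_of_not_contains _ _ (by simpa using hc),
        ih _ (by simp [PySem.Dict.contains_insert, h]),
        PySem.Dict.getD_insert_of_ne _ _ _ hne]

theorem pvBuildMap_append (s t : List Char) (d : PySem.Dict Char Int) :
    pvBuildMap (s ++ t) d = pvBuildMap t (pvBuildMap s d) := by
  simp [pvBuildMap, List.foldl_append]

-- the heart of the A side: A's helper, started with index = size of the dict, fills the vector
-- with the final lookups and leaves exactly the first-occurrence table and its size behind
theorem pvUpdateVec_spec (s : List Char) (j : Nat) (vec : List Int) (d : PySem.Dict Char Int) :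
    (PySem.List.enumerate s (j : Int)).foldl pvStepA (vec, d, (d.size : Int))
      = (pvWrite vec j (s.map (fun c => (pvBuildMap s d).getD c 0)),
         pvBuildMap s d, ((pvBuildMap s d).size : Int)) := by
  induction s generalizing j vec d with
  | nil => rfl
  | cons c s ih =>
    rw [PySem.List.enumerate_cons, List.foldl_cons]
    have hj : ((j : Int) + 1) = ((j + 1 : Nat) : Int) := by push_cast; ring
    by_cases hc : d.contains c = true
    · have hstep : pvStepA (vec, d, (d.size : Int)) ((j : Int), c)
          = (vec.set j (d.getD c 0), d, (d.size : Int)) := by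
        simp [pvStepA, hc, PySem.List.pySetD_natCast]
      rw [hstep, hj, ih (j + 1) (vec.set j (d.getD c 0)) d,
        pvBuildMap_cons, PySem.Dict.setdefault_of_contains _ _ hc]
      simp [pvWrite, pvBuildMap_getD s d c hc]
    · have hstep : pvStepA (vec, d, (d.size : Int)) ((j : Int), c)
          = (vec.set j ((d.insert c (d.size : Int)).getD c 0), d.insert c (d.size : Int),
             ((d.insert c (d.size : Int)).size : Int)) := by
        simp [pvStepA, hc, PySem.List.pySetD_natCast, PySem.Dict.size_insert]
      rw [hstep, hj, ih (j + 1) _ (d.insert c (d.size : Int)),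
        pvBuildMap_cons, PySem.Dict.setdefault_of_not_contains _ _ (by simpa using hc)]
      simp [pvWrite, pvBuildMap_getD s _ c (PySem.Dict.contains_insert_self d c _),
        PySem.Dict.getD_insert_self]

theorem pvUpdateVec_eq (s : List Char) (vec : List Int) (d : PySem.Dict Char Int) (index : Int)
    (h : index = (d.size : Int)) :
    pvUpdateVec s vec d index
      = (pvWrite vec 0 (s.map (fun c => (pvBuildMap s d).getD c 0)),
         pvBuildMap s d, ((pvBuildMap s d).size : Int)) := by
  subst h
  simpa [pvUpdateVec] using pvUpdateVec_spec s 0 vec d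

-- the first-occurrence table's basic shape, by snoc induction
theorem pvBuildMap_singleton (c : Char) (d : PySem.Dict Char Int) :
    pvBuildMap [c] d = d.setdefault c (d.size : Int) := rfl

theorem pvBuildMap_contains (t : List Char) : ∀ c,
    (pvBuildMap t PySem.Dict.empty).contains c = decide (c ∈ t) := by
  induction t using List.reverseRecOn with
  | nil => intro c; simp [pvBuildMap, PySem.Dict.contains_empty]
  | append_singleton t c' ih =>
    intro c
    rw [pvBuildMap_append, pvBuildMap_singleton]
    by_cases hc' : c' ∈ t
    · rw [PySem.Dict.setdefault_of_contains _ _ (by rw [ih]; simpa using hc'), ih]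
      by_cases h : c = c' <;> simp [h, hc']
    · rw [PySem.Dict.setdefault_of_not_contains _ _ (by rw [ih]; simpa using hc'),
        PySem.Dict.contains_insert, ih]
      by_cases h : c = c' <;> simp [h]

theorem pvBuildMap_size (t : List Char) :
    (pvBuildMap t PySem.Dict.empty).size = (PySem.Set.ofList t).length := by
  induction t using List.reverseRecOn with
  | nil => simp [pvBuildMap, PySem.Dict.size_empty, PySem.Set.ofList_nil]
  | append_singleton t c' ih =>
    rw [pvBuildMap_append, pvBuildMap_singleton, PySem.Set.ofList_append_singleton]
    by_cases hmem : c' ∈ t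
    · rw [PySem.Dict.setdefault_of_contains _ _ (by rw [pvBuildMap_contains]; simpa using hmem),
        ih]
      simp [PySem.Set.add, hmem]
    · rw [PySem.Dict.setdefault_of_not_contains _ _
          (by rw [pvBuildMap_contains]; simpa using hmem),
        PySem.Dict.size_insert, pvBuildMap_contains]
      simp [PySem.Set.add, hmem, ih]

-- the dict lookup IS B's closed form
theorem pvBuildMap_getD_closed (t : List Char) (c : Char) (hm : c ∈ t) :
    (pvBuildMap t PySem.Dict.empty).getD c 0 = pvCode t c := by
  induction t using List.reverseRecOn with
  | nil => simp at hm
  | append_singleton t c' ih =>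
    rw [pvBuildMap_append, pvBuildMap_singleton]
    by_cases hmem : c ∈ t
    · -- c already occurs in t: dict value and closed form both ignore the appended c'
      obtain ⟨k, hk⟩ : ∃ k, PySem.List.index? t c = some k :=
        Option.isSome_iff_exists.mp ((PySem.List.index?_isSome_iff (xs := t) (v := c)).mpr hmem)
      obtain ⟨hklt, -, -⟩ := PySem.List.getElem_of_index?_eq_some hk
      have hcode : pvCode (t ++ [c']) c = pvCode t c := by
        unfold pvCode
        rw [PySem.List.index?_append_of_mem _ hmem, hk]
        simp only [Option.getD_some]
        rw [PySem.List.slice_to_natCast, PySem.List.slice_to_natCast,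
          List.take_append_of_le_length (Nat.le_of_lt hklt)]
      rw [hcode, ← ih hmem]
      by_cases hc : (pvBuildMap t PySem.Dict.empty).contains c' = true
      · rw [PySem.Dict.setdefault_of_contains _ _ hc]
      · have hne : c ≠ c' := by
          intro he
          exact absurd (by rw [pvBuildMap_contains]; simpa [he] using hmem) hc
        rw [PySem.Dict.setdefault_of_not_contains _ _ (by simpa using hc),
          PySem.Dict.getD_insert_of_ne _ _ _ hne]
    · -- c is new: it must be the appended char, and gets code = number of distinct chars of t
      have hcc : c = c' := by
        rcases List.mem_append.mp hm with h | h
        · exact absurd h hmem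
        · simpa using h
      subst hcc
      have hc : (pvBuildMap t PySem.Dict.empty).contains c = false := by
        rw [pvBuildMap_contains]; simpa using hmem
      rw [PySem.Dict.setdefault_of_not_contains _ _ hc, PySem.Dict.getD_insert_self,
        pvBuildMap_size]
      unfold pvCode
      rw [PySem.List.index?_append_singleton_self t c hmem]
      simp only [Option.getD_some]
      rw [PySem.List.slice_to_natCast, List.take_left]

-- getD through a build over a later segment is unchanged for chars of an earlier segment
theorem pvBuildMap_getD_extend (s rest : List Char) (c : Char) (hm : c ∈ s) :
    (pvBuildMap (s ++ rest) PySem.Dict.empty).getD c 0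
      = (pvBuildMap s PySem.Dict.empty).getD c 0 := by
  rw [pvBuildMap_append]
  exact pvBuildMap_getD rest (pvBuildMap s PySem.Dict.empty) c
    (by rw [pvBuildMap_contains]; simpa using hm)

-- both ports, after the identical parsing, as a function of the three character lists
theorem pvCore (s1 s2 s3 : List Char) :
    (let input1_vec := (PySem.List.pyRange 0 (PySem.List.len s1) 1).map (fun _ => (-1 : Int))
     let input2_vec := (PySem.List.pyRange 0 (PySem.List.len s2) 1).map (fun _ => (-1 : Int))
     let output_vec := (PySem.List.pyRange 0 (PySem.List.len s3) 1).map (fun _ => (-1 : Int))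
     let r1 := pvUpdateVec s1 input1_vec PySem.Dict.empty 0
     let r2 := pvUpdateVec s2 input2_vec r1.2.1 r1.2.2
     let r3 := pvUpdateVec s3 output_vec r2.2.1 r2.2.2
     (r1.1, r2.1, r3.1))
    = (let t := s1 ++ s2 ++ s3
       (s1.map (pvCode t), s2.map (pvCode t), s3.map (pvCode t))) := by
  simp only [pvUpdateVec_eq _ _ PySem.Dict.empty 0 rfl,
    pvUpdateVec_eq _ _ (pvBuildMap s1 PySem.Dict.empty) _ rfl,
    pvUpdateVec_eq _ _ (pvBuildMap s2 (pvBuildMap s1 PySem.Dict.empty)) _ rfl]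
  rw [show pvBuildMap s2 (pvBuildMap s1 PySem.Dict.empty)
      = pvBuildMap (s1 ++ s2) PySem.Dict.empty from (pvBuildMap_append s1 s2 _).symm,
    show pvBuildMap s3 (pvBuildMap (s1 ++ s2) PySem.Dict.empty)
      = pvBuildMap (s1 ++ s2 ++ s3) PySem.Dict.empty from (pvBuildMap_append _ s3 _).symm]
  refine Prod.ext ?_ (Prod.ext ?_ ?_) <;> simp only []
  · rw [pvWrite_full _ _ (by simp)]
    apply List.map_congr_left
    intro c hcmem
    rw [← pvBuildMap_getD_closed _ _ (show c ∈ s1 ++ s2 ++ s3 by simp [hcmem]),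
      List.append_assoc, pvBuildMap_getD_extend s1 (s2 ++ s3) c hcmem]
  · rw [pvWrite_full _ _ (by simp)]
    apply List.map_congr_left
    intro c hcmem
    rw [← pvBuildMap_getD_closed _ _ (show c ∈ s1 ++ s2 ++ s3 by simp [hcmem]),
      pvBuildMap_getD_extend (s1 ++ s2) s3 c (by simp [hcmem]), pvBuildMap_append]
  · rw [pvWrite_full _ _ (by simp)]
    apply List.map_congr_left
    intro c hcmem
    rw [← pvBuildMap_getD_closed _ _ (show c ∈ s1 ++ s2 ++ s3 by simp [hcmem]),
      pvBuildMap_append, pvBuildMap_append]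

-- ===== VERDICT (by name: the statement is the Claim_ definition above) =====
theorem parse_einsum_equation_spec : Claim_equal_parse_einsum_equation := by
  intro equation _ _
  unfold Spec_parse_einsum_equation parse_einsum_equation parse_einsum_equation_alt
  exact pvCore _ _ _
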